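-- pv_equiv track=rewrite | github.com/WriteWrote/vsu_faculties_prediction | data_restoring.py | scrape_groups_ids
-- ===== SOURCE A (Python) =====
-- def scrape_groups_ids(full_data: list, groups_list: list):
--     clean_groups = []
--
--     for group in full_data:
--         clean_groups.append(str(group[0]))
--
--     result = []
--
--     for group in groups_list:
--         if clean_groups.__contains__(group):
--             result.append(1)
--         else:
--             result.append(0)
--
--     return result
-- ===== SOURCE B (Python) =====
-- def scrape_groups_ids(full_data: list, groups_list: list):
--     # Build an index group-value -> list of positions once, then mark matches
--     # row by row: no per-group scan of the data keys.
--     index = {}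
--     for i, group in enumerate(groups_list):
--         index[group] = index.get(group, []) + [i]
--     result = [0] * len(groups_list)
--     for row in full_data:
--         for i in index.get(str(row[0]), []):
--             result[i] = 1
--     return result
-- ===== Notes on version B (the rewrite author's own statement) =====
-- stated objective: faster
-- what changed: B inverts the iteration: it builds a hash index from each group value to its positions once, initialises an all-zero flag list, and marks the indexed positions per data row, removing A's per-group scan of the materialised key list.
import Mathlib
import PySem

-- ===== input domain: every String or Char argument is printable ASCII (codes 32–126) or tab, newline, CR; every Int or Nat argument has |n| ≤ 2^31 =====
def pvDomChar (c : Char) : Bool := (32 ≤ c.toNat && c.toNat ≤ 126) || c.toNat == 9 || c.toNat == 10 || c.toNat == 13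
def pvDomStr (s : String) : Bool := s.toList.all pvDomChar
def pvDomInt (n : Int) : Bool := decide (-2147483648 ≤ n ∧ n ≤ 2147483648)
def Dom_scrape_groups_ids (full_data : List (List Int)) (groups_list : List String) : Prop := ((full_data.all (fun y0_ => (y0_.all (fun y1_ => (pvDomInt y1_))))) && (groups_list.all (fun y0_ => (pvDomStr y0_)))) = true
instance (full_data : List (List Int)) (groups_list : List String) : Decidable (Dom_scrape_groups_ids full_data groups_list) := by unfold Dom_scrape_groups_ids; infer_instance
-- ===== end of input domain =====

-- B inverts the iteration: a hash index from group value to positions, zero-initialised flags marked row by row.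
-- Pre_ excludes inputs on which Python A raises IndexError (an empty row); equivalence is about the return value only.
-- ===== PORT A =====
def scrape_groups_ids (full_data : List (List Int)) (groups_list : List String) : List Int :=
  let clean_groups := full_data.foldl
    (fun acc group => acc ++ [PySem.Int.toStr ((PySem.List.pyGet? group 0).getD 0)]) []
  groups_list.foldl (fun acc group => acc ++ [if clean_groups.contains group then 1 else 0]) []

-- ===== PORT B =====
def scrape_groups_ids_alt (full_data : List (List Int)) (groups_list : List String) : List Int :=
  let index : PySem.Dict String (List Int) :=
    (PySem.List.enumerate groups_list).foldl
      (fun d p => PySem.Dict.modify d p.2 [] (fun l => l ++ [p.1])) PySem.Dict.empty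
  full_data.foldl
    (fun result row =>
      (PySem.Dict.getD index (PySem.Int.toStr ((PySem.List.pyGet? row 0).getD 0)) []).foldl
        (fun r i => PySem.List.pySetD r i 1) result)
    (List.replicate groups_list.length 0)

-- ===== PRECONDITION & SPEC =====
-- Pre_ excludes exactly the inputs on which Python A raises IndexError: a row of full_data that is empty.
def Pre_scrape_groups_ids (full_data : List (List Int)) (_groups_list : List String) : Prop :=
  ∀ row ∈ full_data, row ≠ []
instance (full_data : List (List Int)) (groups_list : List String) : Decidable (Pre_scrape_groups_ids full_data groups_list) := by unfold Pre_scrape_groups_ids; infer_instance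
def pvWitness_scrape_groups_ids : List (List Int) × List String := ([[1], [2, 3]], ["1", "5"])
def Spec_scrape_groups_ids (full_data : List (List Int)) (groups_list : List String) (out : List Int) : Prop := out = scrape_groups_ids_alt full_data groups_list
instance (full_data : List (List Int)) (groups_list : List String) (out : List Int) : Decidable (Spec_scrape_groups_ids full_data groups_list out) := by unfold Spec_scrape_groups_ids; infer_instance

-- ===== CLAIM (what is proved, stated in full; the proofs are below) =====
def Claim_equal_scrape_groups_ids : Prop := ∀ (full_data : List (List Int)) (groups_list : List String), Dom_scrape_groups_ids full_data groups_list → Pre_scrape_groups_ids full_data groups_list → Spec_scrape_groups_ids full_data groups_list (scrape_groups_ids full_data groups_list)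

-- ===== LEMMAS AND PROOFS =====

theorem pv_foldl_append_map {α β : Type} (f : α → β) (l : List α) (acc : List β) :
    l.foldl (fun acc x => acc ++ [f x]) acc = acc ++ l.map f := by
  induction l generalizing acc with
  | nil => simp
  | cons x xs ih => simp [List.foldl, ih]

-- the index that B builds maps each group to the list of its positions in groups_list
theorem pv_index_getD (gl : List String) (k : String) :
    PySem.Dict.getD
      ((PySem.List.enumerate gl).foldl
        (fun d p => PySem.Dict.modify d p.2 [] (fun l => l ++ [p.1])) PySem.Dict.empty) k []
    = ((PySem.List.enumerate gl).filter (fun p => p.2 == k)).map (·.1) := by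
  have hswap : (PySem.List.enumerate gl).foldl
      (fun d p => PySem.Dict.modify d p.2 [] (fun l => l ++ [p.1])) PySem.Dict.empty
      = ((PySem.List.enumerate gl).map Prod.swap).foldl
          (fun d p => PySem.Dict.modify d p.1 [] (fun l => l ++ [p.2])) PySem.Dict.empty := by
    rw [List.foldl_map]
    simp
  rw [hswap, PySem.Dict.getD_foldl_modify_append, PySem.Dict.getD_empty, List.nil_append]
  rw [List.filter_map, List.map_map]
  rfl

-- elementwise effect of marking a list of in-range nonnegative positions with 1
theorem pv_set_getElem? (L : List Int) (state : List Int) (j : Nat)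
    (h : ∀ i ∈ L, 0 ≤ i ∧ i.toNat < state.length) :
    (L.foldl (fun r i => PySem.List.pySetD r i 1) state)[j]?
      = if (j : Int) ∈ L then some 1 else state[j]? := by
  induction L generalizing state with
  | nil => simp
  | cons i L ih =>
    have hi := h i (List.mem_cons_self)
    have hset : PySem.List.pySetD state i (1 : Int) = state.set i.toNat 1 :=
      PySem.List.pySetD_of_nonneg _ _ hi.1
    have hlen : (PySem.List.pySetD state i (1 : Int)).length = state.length := by
      rw [hset]; simp
    rw [List.foldl_cons, ih _ (fun i' hi' => by
      have := h i' (List.mem_cons_of_mem _ hi'); rw [hlen]; exact this)]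
    by_cases hmem : (j : Int) ∈ L
    · simp [hmem]
    · by_cases hji : (j : Int) = i
      · have hj : i.toNat = j := by omega
        simp only [hset, hj, List.mem_cons, hji, true_or, if_true]
        rw [List.getElem?_set]
        have : j < state.length := by omega
        simp [this]
      · have : ¬ ((j : Int) ∈ i :: L) := by
          simp [List.mem_cons, hji, hmem]
        simp only [hmem, if_false, this, if_false, hset]
        rw [List.getElem?_set]
        have : ¬ (i.toNat = j) := by omega
        simp [this]

-- marking all positions of key k turns map χ into map (if · == k then 1 else χ ·)
theorem pv_mark (gl : List String) (k : String) (χ : String → Int) :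
    (((PySem.List.enumerate gl).filter (fun p => p.2 == k)).map (·.1)).foldl
      (fun r i => PySem.List.pySetD r i 1) (gl.map χ)
    = gl.map (fun g => if g == k then 1 else χ g) := by
  apply List.ext_getElem?
  intro j
  rw [pv_set_getElem?]
  · have hmem : ((j : Int) ∈ ((PySem.List.enumerate gl).filter (fun p => p.2 == k)).map (·.1))
        ↔ (∃ h : j < gl.length, gl[j] = k) := by
      constructor
      · rintro hm
        simp only [List.mem_map, List.mem_filter] at hm
        obtain ⟨p, ⟨hp, hpk⟩, hpj⟩ := hm
        rw [PySem.List.mem_enumerate_iff] at hp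
        obtain ⟨kk, hkk, rfl⟩ := hp
        simp only at hpj hpk
        have : kk = j := by omega
        subst this
        exact ⟨hkk, by simpa using hpk⟩
      · rintro ⟨hj, hk⟩
        simp only [List.mem_map, List.mem_filter]
        exact ⟨((j : Int), gl[j]), ⟨by
          rw [PySem.List.mem_enumerate_iff]; exact ⟨j, hj, by simp⟩, by simpa using hk⟩, rfl⟩
    by_cases hj : j < gl.length
    · by_cases hk : gl[j] = k
      · rw [if_pos (hmem.2 ⟨hj, hk⟩)]
        rw [List.getElem?_map]
        have : gl[j]? = some gl[j] := List.getElem?_eq_getElem hj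
        simp [this, hk]
      · have : ¬ ((j : Int) ∈ ((PySem.List.enumerate gl).filter (fun p => p.2 == k)).map (·.1)) := by
          intro hm; exact hk (hmem.1 hm).2
        rw [if_neg this]
        rw [List.getElem?_map, List.getElem?_map]
        simp [List.getElem?_eq_getElem hj, hk]
    · have : ¬ ((j : Int) ∈ ((PySem.List.enumerate gl).filter (fun p => p.2 == k)).map (·.1)) := by
        intro hm; exact hj (hmem.1 hm).1
      rw [if_neg this]
      rw [List.getElem?_map, List.getElem?_map]
      simp [List.getElem?_eq_none (le_of_not_gt hj)]
  · intro i hi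
    simp only [List.mem_map, List.mem_filter] at hi
    obtain ⟨p, ⟨hp, _⟩, hpj⟩ := hi
    rw [PySem.List.mem_enumerate_iff] at hp
    obtain ⟨kk, hkk, rfl⟩ := hp
    simp only at hpj
    subst hpj
    constructor
    · omega
    · simp; omega

theorem pv_alt_invariant (rows : List (List Int)) (gl : List String) (χ : String → Int) :
    rows.foldl
      (fun result row =>
        (PySem.Dict.getD
          ((PySem.List.enumerate gl).foldl
            (fun d p => PySem.Dict.modify d p.2 [] (fun l => l ++ [p.1])) PySem.Dict.empty)
          (PySem.Int.toStr ((PySem.List.pyGet? row 0).getD 0)) []).foldl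
          (fun r i => PySem.List.pySetD r i 1) result)
      (gl.map χ)
    = gl.map (fun g =>
        if (rows.map (fun row => PySem.Int.toStr ((PySem.List.pyGet? row 0).getD 0))).contains g
        then 1 else χ g) := by
  induction rows generalizing χ with
  | nil => simp
  | cons row rest ih =>
    rw [List.foldl_cons, pv_index_getD, pv_mark, ih]
    apply List.map_congr_left
    intro g _
    simp only [List.map_cons, List.contains_cons]
    set k := PySem.Int.toStr ((PySem.List.pyGet? row 0).getD 0) with hkdef
    by_cases hk : g = k
    · simp [hk]
    · simp [hk]

-- ===== VERDICT (by name: the statement is the Claim_ definition above) =====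
theorem scrape_groups_ids_spec : Claim_equal_scrape_groups_ids := by
  intro full_data groups_list _ _
  unfold Spec_scrape_groups_ids scrape_groups_ids scrape_groups_ids_alt
  have hrep : List.replicate groups_list.length (0 : Int)
      = groups_list.map (fun _ => (0 : Int)) := by simp
  rw [hrep, pv_alt_invariant full_data groups_list (fun _ => (0 : Int))]
  simp only [pv_foldl_append_map, List.nil_append]
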